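-- pv_equiv track=rewrite | github.com/mastergreg/aoc-2022 | day1.py | parse
-- ===== SOURCE A (Python) =====
-- def parse(raw):
--     elflist = []
--     current_list = []
--     for line in raw:
--         try:
--             current_list.append(int(line))
--         except ValueError:
--             elflist.append(current_list)
--             current_list = []
--     return elflist
-- ===== SOURCE B (Python) =====
-- def parse(raw):
--     lst = list(raw)
--     bounds = []
--     for i, line in enumerate(lst):
--         try:
--             int(line)
--         except ValueError:
--             bounds.append(i)
--     res = []
--     prev = 0
--     for b in bounds:
--         res.append([int(x) for x in lst[prev:b]])
--         prev = b + 1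
--     return res
-- ===== Notes on version B (the rewrite author's own statement) =====
-- stated objective: alternative
-- what changed: B first records the indices of separator (unparseable) lines in one scan, then builds each group by slicing between consecutive boundaries and converting the slice, instead of A's single accumulator loop; the trailing in-progress group drops out naturally because nothing is emitted after the last boundary.
import Mathlib
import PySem

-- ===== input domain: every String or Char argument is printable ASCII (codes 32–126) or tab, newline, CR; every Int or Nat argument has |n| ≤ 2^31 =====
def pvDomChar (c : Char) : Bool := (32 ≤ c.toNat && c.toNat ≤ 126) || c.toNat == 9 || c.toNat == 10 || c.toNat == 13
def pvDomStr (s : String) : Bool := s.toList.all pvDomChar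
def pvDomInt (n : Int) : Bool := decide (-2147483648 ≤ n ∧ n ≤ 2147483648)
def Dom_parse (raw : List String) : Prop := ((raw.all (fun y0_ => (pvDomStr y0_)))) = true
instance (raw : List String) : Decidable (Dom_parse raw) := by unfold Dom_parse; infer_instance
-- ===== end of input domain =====

-- B replaces A's accumulator loop by a boundary-index scan followed by slicing between
-- consecutive boundaries (alternative decomposition, same cost).


-- ===== PORT A =====
-- A's loop: append int(line) to the current group; on ValueError close the current group.
def parseLoop : List String → List (List Int) → List Int → List (List Int)
  | [], elflist, _ => elflist
  | line :: rest, elflist, cur =>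
    match PySem.Int.ofStr? line with
    | some n => parseLoop rest elflist (cur ++ [n])
    | none => parseLoop rest (elflist ++ [cur]) []

def parse (raw : List String) : List (List Int) := parseLoop raw [] []

-- ===== PORT B =====
-- indices (from i) of lines on which int() raises ValueError
def altBounds : List String → Nat → List Nat
  | [], _ => []
  | line :: rest, i =>
    match PySem.Int.ofStr? line with
    | some _ => altBounds rest (i + 1)
    | none => i :: altBounds rest (i + 1)

-- int(x): guaranteed to parse inside a slice between boundaries (getD 0 is never taken there)
def altInt (s : String) : Int := (PySem.Int.ofStr? s).getD 0

def altBuild (lst : List String) : List Nat → Nat → List (List Int) → List (List Int)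
  | [], _, res => res
  | b :: bs, prev, res =>
      altBuild lst bs (b + 1)
        (res ++ [(PySem.List.slice lst (some (prev : Int)) (some (b : Int))).map altInt])

def parse_alt (raw : List String) : List (List Int) :=
  altBuild raw (altBounds raw 0) 0 []

-- ===== PRECONDITION & SPEC =====
def Spec_parse (raw : List String) (out : List (List Int)) : Prop := out = parse_alt raw
instance (raw : List String) (out : List (List Int)) : Decidable (Spec_parse raw out) := by unfold Spec_parse; infer_instance

-- ===== CLAIM (what is proved, stated in full; the proofs are below) =====
def Claim_equal_parse : Prop := ∀ (raw : List String), Dom_parse raw → Spec_parse raw (parse raw)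

-- ===== LEMMAS AND PROOFS =====

theorem parse_invariant (raw : List String) :
    ∀ (lst : List String) (i prev : Nat) (res : List (List Int)),
      lst.drop i = raw → prev ≤ i →
      parseLoop raw res (((lst.drop prev).take (i - prev)).map altInt)
        = altBuild lst (altBounds raw i) prev res := by
  induction raw with
  | nil => intro lst i prev res _ _; simp [parseLoop, altBounds, altBuild]
  | cons line rest ih =>
    intro lst i prev res hdrop hle
    have hi : i < lst.length := by
      by_contra h
      simp [List.drop_eq_nil_of_le (Nat.le_of_not_lt h)] at hdrop
    have hget : lst[i]'hi = line := by
      have h0 : (lst.drop i)[0]'(by simp [hdrop]) = line := by simp [hdrop]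
      rw [List.getElem_drop] at h0
      simpa using h0
    have hdrop' : lst.drop (i + 1) = rest := by
      have : lst.drop (i + 1) = (lst.drop i).drop 1 := by
        rw [List.drop_drop]
      simp [this, hdrop]
    -- the slice up to i+1 extends the slice up to i by lst[i]
    have hslice : (lst.drop prev).take (i + 1 - prev)
        = (lst.drop prev).take (i - prev) ++ [line] := by
      have hlen : i - prev < (lst.drop prev).length := by
        simp [List.length_drop]; omega
      have hgd : (lst.drop prev)[i - prev]'hlen = line := by
        rw [List.getElem_drop]
        have hpi : prev + (i - prev) = i := by omega
        simp only [hpi]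
        exact hget
      have : i + 1 - prev = (i - prev) + 1 := by omega
      rw [this, List.take_add_one]
      simp [List.getElem?_eq_getElem hlen, hgd]
    cases hof : PySem.Int.ofStr? line with
    | some n =>
      simp only [parseLoop, altBounds, hof]
      have : ((lst.drop prev).take (i - prev)).map altInt ++ [n]
          = ((lst.drop prev).take (i + 1 - prev)).map altInt := by
        simp [hslice, altInt, hof]
      rw [this]
      exact ih lst (i + 1) prev res hdrop' (by omega)
    | none =>
      simp only [parseLoop, altBounds, hof, altBuild]
      have h0 : ((lst.drop (i+1)).take (i + 1 - (i+1))).map altInt = ([] : List Int) := by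
        simp
      have := ih lst (i + 1) (i + 1)
        (res ++ [(PySem.List.slice lst (some (prev : Int)) (some (i : Int))).map altInt])
        hdrop' (Nat.le_refl _)
      rw [h0] at this
      rw [← this]
      congr 1
      rw [PySem.List.slice_natCast]

theorem parse_spec_total (raw : List String) : parse raw = parse_alt raw := by
  have := parse_invariant raw raw 0 0 [] (by simp) (Nat.le_refl 0)
  simpa [parse, parse_alt] using this

-- ===== VERDICT (by name: the statement is the Claim_ definition above) =====
theorem parse_spec : Claim_equal_parse := by
  intro raw _
  unfold Spec_parse
  exact parse_spec_total raw
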